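-- pv_equiv track=rewrite | github.com/c-f-h/pyiga | pyiga/bspline.py | multi_indices
-- ===== SOURCE A (Python) =====
-- def multi_indices(N, k=0):
--     assert N>0 and k>=0, "N must be positive and k non-negative."
--     if N==1:
--         yield (k,)
--     else:
--         for i in range(k,-1,-1):
--             for j in multi_indices(N-1,k-i):
--                 yield (i,) + j
-- ===== SOURCE B (Python) =====
-- def multi_indices(N, k=0):
--     assert N>0 and k>=0, "N must be positive and k non-negative."
--     # stars-and-bars: each composition of k into N parts corresponds to a
--     # choice of N-1 bar positions in range(k+N-1); descending-lex combinations
--     # give A's descending-lex order of the parts.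
--     def dcombs(lo, n, r):
--         # descending-lex r-combinations (as tuples) of range(lo, n)
--         if r == 0:
--             yield ()
--         else:
--             for x in range(n - r, lo - 1, -1):
--                 for rest in dcombs(x + 1, n, r - 1):
--                     yield (x,) + rest
--     for c in dcombs(0, k + N - 1, N - 1):
--         d = (-1,) + c + (k + N - 1,)
--         yield tuple(b - a - 1 for a, b in zip(d, d[1:]))
-- ===== Notes on version B (the rewrite author's own statement) =====
-- stated objective: alternative
-- what changed: Replaces A's recursion on the number of parts by the stars-and-bars bijection: enumerate N-1 bar positions as ascending-lex combinations of range(k+N-1), reverse, and map each combination to its gap sizes.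
import Mathlib
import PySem

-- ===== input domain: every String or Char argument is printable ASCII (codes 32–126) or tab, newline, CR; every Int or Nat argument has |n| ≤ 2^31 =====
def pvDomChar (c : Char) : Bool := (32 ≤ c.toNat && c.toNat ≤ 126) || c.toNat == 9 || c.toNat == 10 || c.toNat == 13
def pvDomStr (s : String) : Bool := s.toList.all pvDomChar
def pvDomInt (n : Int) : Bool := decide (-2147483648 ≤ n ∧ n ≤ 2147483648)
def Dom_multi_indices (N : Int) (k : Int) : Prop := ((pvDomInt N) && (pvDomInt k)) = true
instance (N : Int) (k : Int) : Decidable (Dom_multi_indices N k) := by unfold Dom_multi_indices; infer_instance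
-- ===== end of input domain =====

-- B replaces A's recursion on the number of parts by the stars-and-bars bijection
-- (reversed ascending-lex bar combinations mapped to gap sizes); objective: alternative.
-- Both Pythons are generators; equivalence is about the list of yielded tuples.

-- ===== PORT A =====
-- A recurses on N (an int); the port recurses on N.toNat (N > 0 inside Pre_).
def miA : Nat → Int → List (List Int)
  | 0, _ => []            -- unreachable under Pre_ (assert fails for N ≤ 0)
  | 1, k => [[k]]
  | (n+2), k =>
      (PySem.List.pyRange k (-1) (-1)).flatMap
        (fun i => (miA (n+1) (k - i)).map (fun j => i :: j))

def multi_indices (N : Int) (k : Int) : List (List Int) := miA N.toNat k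

-- ===== PORT B =====
-- descending-lex r-combinations of range(lo, n) (B's helper `dcombs`, recursion on r)
def combsD (lo n : Int) : Nat → List (List Int)
  | 0 => [[]]
  | (r+1) =>
      (PySem.List.pyRange (n - ((r:Int)+1)) (lo - 1) (-1)).flatMap
        (fun x => (combsD (x+1) n r).map (fun rest => x :: rest))

-- `tuple(b - a - 1 for a, b in zip(d, d[1:]))`
def gapsB (d : List Int) : List Int := List.zipWith (fun a b => b - a - 1) d d.tail

def multi_indices_alt (N : Int) (k : Int) : List (List Int) :=
  (combsD 0 (k + N - 1) (N - 1).toNat).map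
    (fun c => gapsB (-1 :: (c ++ [k + N - 1])))

-- ===== PRECONDITION & SPEC =====
-- A's `assert N>0 and k>=0` raises AssertionError (upon first iteration) otherwise.
def Pre_multi_indices (N : Int) (k : Int) : Prop := 0 < N ∧ 0 ≤ k
instance (N : Int) (k : Int) : Decidable (Pre_multi_indices N k) := by unfold Pre_multi_indices; infer_instance
def pvWitness_multi_indices : Int × Int := (3, 4)

def Spec_multi_indices (N : Int) (k : Int) (out : List (List Int)) : Prop := out = multi_indices_alt N k
instance (N : Int) (k : Int) (out : List (List Int)) : Decidable (Spec_multi_indices N k out) := by unfold Spec_multi_indices; infer_instance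

-- ===== CLAIM (what is proved, stated in full; the proofs are below) =====
def Claim_equal_multi_indices : Prop := ∀ (N : Int) (k : Int), Dom_multi_indices N k → Pre_multi_indices N k → Spec_multi_indices N k (multi_indices N k)

-- ===== LEMMAS AND PROOFS =====

-- proof-side helper: the same combinations in ascending-lex order
def combsB (lo n : Int) : Nat → List (List Int)
  | 0 => [[]]
  | (r+1) =>
      (PySem.List.pyRange lo (n - r) 1).flatMap
        (fun x => (combsB (x+1) n r).map (fun rest => x :: rest))

-- range(a, b) is an affine image of List.range (restated from PySem for rewriting)
theorem pyRange_one' (a b : Int) :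
    PySem.List.pyRange a b 1 = (List.range (b - a).toNat).map (fun k : Nat => a + (k : Int)) :=
  PySem.List.pyRange_one a b

-- shifting the bounds of range(a, b) shifts its elements
theorem pyRange_shift (a b s : Int) :
    PySem.List.pyRange (a + s) (b + s) 1 = (PySem.List.pyRange a b 1).map (· + s) := by
  rw [pyRange_one', pyRange_one']
  have : (b + s - (a + s)) = b - a := by ring
  rw [this, List.map_map]
  apply List.map_congr_left
  intro x _
  simp; ring

-- range(k, -1, -1) is the reverse of range(0, k+1)
theorem pyRange_down (k : Int) :
    PySem.List.pyRange k (-1) (-1) = (PySem.List.pyRange 0 (k + 1) 1).reverse := by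
  have h := PySem.List.pyRange_neg_one_eq_reverse (a := k) (b := -1)
  simpa using h

-- gapsB peels one gap off two leading bars
theorem gapsB_cons_cons (a b : Int) (t : List Int) :
    gapsB (a :: b :: t) = (b - a - 1) :: gapsB (b :: t) := rfl

-- combinations of a shifted range are the shifted combinations
theorem combsB_shift (r : Nat) : ∀ (lo n s : Int),
    combsB (lo + s) (n + s) r = (combsB lo n r).map (List.map (· + s)) := by
  induction r with
  | zero => intro lo n s; simp [combsB]
  | succ r ih =>
      intro lo n s
      simp only [combsB]
      have : n + s - (r:Int) = (n - r) + s := by ring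
      rw [this, pyRange_shift, List.flatMap_map, List.map_flatMap]
      apply List.flatMap_congr
      intro x _
      have hx : x + s + 1 = (x + 1) + s := by ring
      rw [hx, ih (x+1) n s, List.map_map, List.map_map]
      rfl

-- gap sizes are invariant under shifting every bar
theorem gapsB_shift (s : Int) : ∀ (l : List Int), gapsB (l.map (· + s)) = gapsB l := by
  intro l
  induction l with
  | nil => rfl
  | cons a t ih =>
      cases t with
      | nil => rfl
      | cons b t' =>
          simp only [gapsB, List.map_cons, List.tail_cons, List.zipWith_cons_cons] at *
          rw [ih]
          congr 1
          ring

theorem flatMap_congr' {α β : Type} (l : List α) (f g : α → List β)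
    (h : ∀ x ∈ l, f x = g x) : l.flatMap f = l.flatMap g := by
  induction l with
  | nil => rfl
  | cons a t ih =>
      simp only [List.flatMap_cons]
      rw [h a (by simp), ih (fun x hx => h x (by simp [hx]))]

-- B's descending-lex combinations are the reverse of the ascending-lex ones
theorem combsD_eq (r : Nat) : ∀ (lo n : Int),
    combsD lo n r = (combsB lo n r).reverse := by
  induction r with
  | zero => intro lo n; rfl
  | succ r ih =>
      intro lo n
      simp only [combsD, combsB]
      rw [List.reverse_flatMap]
      have hrange : PySem.List.pyRange (n - ((r:Int)+1)) (lo - 1) (-1)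
          = (PySem.List.pyRange lo (n - r) 1).reverse := by
        rw [PySem.List.pyRange_neg_one_eq_reverse,
            show lo - 1 + 1 = lo by ring,
            show n - ((r:Int)+1) + 1 = n - (r:Int) by ring]
      rw [hrange]
      apply flatMap_congr'
      intro x _
      simp only [Function.comp_def]
      rw [ih (x+1) n, List.map_reverse]

-- main induction: A's recursion equals B's reversed stars-and-bars, for N = n+1
theorem miA_eq (n : Nat) : ∀ (k : Int), 0 ≤ k →
    miA (n+1) k =
      (combsB 0 (k + n) n).reverse.map (fun c => gapsB (-1 :: (c ++ [k + (n:Int)]))) := by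
  induction n with
  | zero =>
      intro k hk
      simp [miA, combsB, gapsB]
  | succ n ih =>
      intro k hk
      show (PySem.List.pyRange k (-1) (-1)).flatMap
            (fun i => (miA (n+1) (k - i)).map (fun j => i :: j)) = _
      have hB : combsB 0 (k + ((n+1:Nat):Int)) (n+1) =
          (PySem.List.pyRange 0 (k+1) 1).flatMap
            (fun x => (combsB (x+1) (k + (n:Int) + 1) n).map (fun rest => x :: rest)) := by
        simp only [combsB]
        rw [show k + ((n+1:Nat):Int) - (n:Int) = k + 1 by push_cast; ring,
            show k + ((n+1:Nat):Int) = k + (n:Int) + 1 by push_cast; ring]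
      rw [hB, List.reverse_flatMap, List.map_flatMap, ← pyRange_down k]
      apply flatMap_congr'
      intro i hi
      have hmem : 0 ≤ i ∧ i < k + 1 := by
        rw [pyRange_down k] at hi
        exact (PySem.List.mem_pyRange_one).mp (by simpa using hi)
      obtain ⟨hi0, hik⟩ := hmem
      have hsh := combsB_shift n 0 (k - i + (n:Int)) (i+1)
      rw [show (0:Int) + (i+1) = i + 1 by ring,
          show (k - i + (n:Int)) + (i+1) = k + (n:Int) + 1 by ring] at hsh
      simp only [Function.comp_def]
      rw [hsh, ih (k - i) (by omega)]
      rw [← List.map_reverse, ← List.map_reverse, List.map_map, List.map_map, List.map_map]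
      apply List.map_congr_left
      intro c _
      simp only [Function.comp_apply, List.cons_append]
      rw [show k + ((n+1:Nat):Int) = k + (n:Int) + 1 by push_cast; ring, gapsB_cons_cons]
      have hlist : (i :: (c.map (· + (i+1)) ++ [k + (n:Int) + 1])) =
          ((-1 :: (c ++ [k - i + (n:Int)])).map (· + (i+1))) := by
        simp only [List.map_cons, List.map_append, List.map_nil]
        rw [show (-1:Int) + (i+1) = i by ring,
            show (k - i + (n:Int)) + (i+1) = k + (n:Int) + 1 by ring]
      rw [hlist, gapsB_shift]
      congr 1
      ring

-- ===== VERDICT (by name: the statement is the Claim_ definition above) =====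
theorem multi_indices_spec : Claim_equal_multi_indices := by
  intro N k _ hpre
  obtain ⟨hN, hk⟩ := hpre
  unfold Spec_multi_indices multi_indices multi_indices_alt
  obtain ⟨n, hn⟩ : ∃ n : Nat, N.toNat = n + 1 := ⟨N.toNat - 1, by omega⟩
  rw [hn]
  have h1 : (N - 1).toNat = n := by omega
  have h2 : k + N - 1 = k + n := by omega
  rw [h1, h2, combsD_eq, miA_eq n k hk]
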